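-- pv_equiv track=rewrite | github.com/Sayali1008/conversational-book-recommendation-agent | _data_preprocessing.py | map_genres_to_top_or_other
-- ===== SOURCE A (Python) =====
-- def map_genres_to_top_or_other(genres_row, top_genres):
--     """
--     Map genres to a top-N list, replacing non-top genres with 'other'.
--     Args:
--         genres_row (list[str]): List of genres for a book.
--         top_genres (set[str]): Set of top-N genres.
--     Returns: list[str]: Sorted list with genres mapped to top or 'other'.
--     """
--     # any genre not in top_genres → "other"
--     genre_list = set()
--     for g in genres_row:
--         if g in top_genres:
--             genre_list.add(g)
--         else:
--             genre_list.add("other")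
--
--     return sorted(genre_list)
-- ===== SOURCE B (Python) =====
-- def map_genres_to_top_or_other(genres_row, top_genres):
--     row = set(genres_row)
--     top = set(top_genres)
--     # walk the sorted top genres, keeping those that occur in the row
--     result = [t for t in sorted(top) if t in row]
--     # splice "other" into its sorted slot iff something in the row is non-top
--     if any(g not in top for g in row) and "other" not in result:
--         i = 0
--         while i < len(result) and result[i] < "other":
--             i += 1
--         result.insert(i, "other")
--     return result
-- ===== Notes on version B (the rewrite author's own statement) =====
-- stated objective: alternative
-- what changed: Instead of classifying each row element into a set and sorting at the end, B traverses the sorted top-genre list keeping those present in the row (already in output order) and splices 'other' into its sorted position with an explicit insertion scan when some row genre is non-top.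
import Mathlib
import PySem

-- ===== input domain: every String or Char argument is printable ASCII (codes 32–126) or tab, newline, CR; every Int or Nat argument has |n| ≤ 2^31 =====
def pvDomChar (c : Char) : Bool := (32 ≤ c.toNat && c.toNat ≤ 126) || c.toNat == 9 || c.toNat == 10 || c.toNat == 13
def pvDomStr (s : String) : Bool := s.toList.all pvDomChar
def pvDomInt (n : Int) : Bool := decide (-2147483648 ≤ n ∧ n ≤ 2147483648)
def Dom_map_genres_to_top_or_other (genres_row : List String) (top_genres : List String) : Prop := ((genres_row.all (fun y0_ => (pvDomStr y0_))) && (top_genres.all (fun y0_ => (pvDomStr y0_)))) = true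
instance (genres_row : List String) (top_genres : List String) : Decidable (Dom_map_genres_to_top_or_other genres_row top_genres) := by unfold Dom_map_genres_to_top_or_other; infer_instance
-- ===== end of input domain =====

-- B traverses the sorted top-genre list (not the row) and splices "other" into its sorted slot by an insertion scan; return value only, no mutation.

-- ===== PORT A =====
-- loop: for g in genres_row: add g if g in top_genres else add "other"; then sorted(set)
def map_genres_to_top_or_other (genres_row : List String) (top_genres : List String) : List String :=
  let genre_list : PySem.Set String :=
    genres_row.foldl (fun acc g =>
      if top_genres.contains g then PySem.Set.add acc g else PySem.Set.add acc "other")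
      PySem.Set.empty
  PySem.List.sorted genre_list (fun x => x) false

-- ===== PORT B =====
-- result = [t for t in sorted(top) if t in row]; then the any-check + while-scan + list.insert of "other"
def map_genres_to_top_or_other_alt (genres_row : List String) (top_genres : List String) : List String :=
  let row := PySem.Set.ofList genres_row
  let top := PySem.Set.ofList top_genres
  let result := (PySem.List.sorted top (fun x => x) false).filter (fun t => PySem.Set.contains row t)
  if (row.any (fun g => !(PySem.Set.contains top g))) && !(result.contains "other") then
    -- while i < len(result) and result[i] < "other": i += 1  — i ends as the length of the strict prefix below "other"
    let i := (result.takeWhile (fun x => decide (x < "other"))).length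
    PySem.List.insert result (i : Int) "other"
  else
    result

-- ===== PRECONDITION & SPEC =====
def Spec_map_genres_to_top_or_other (genres_row : List String) (top_genres : List String) (out : List String) : Prop := out = map_genres_to_top_or_other_alt genres_row top_genres
instance (genres_row : List String) (top_genres : List String) (out : List String) : Decidable (Spec_map_genres_to_top_or_other genres_row top_genres out) := by unfold Spec_map_genres_to_top_or_other; infer_instance

-- ===== CLAIM (what is proved, stated in full; the proofs are below) =====
def Claim_equal_map_genres_to_top_or_other : Prop := ∀ (genres_row : List String) (top_genres : List String), Dom_map_genres_to_top_or_other genres_row top_genres → Spec_map_genres_to_top_or_other genres_row top_genres (map_genres_to_top_or_other genres_row top_genres)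

-- ===== LEMMAS AND PROOFS =====

-- A's loop builds set(map(classify, genres_row)).
theorem aSet_eq_ofList_map (genres_row top_genres : List String) :
    genres_row.foldl (fun acc g =>
      if top_genres.contains g then PySem.Set.add acc g else PySem.Set.add acc "other")
      PySem.Set.empty
    = PySem.Set.ofList (genres_row.map (fun g => if top_genres.contains g then g else "other")) := by
  have h1 : (fun (acc : PySem.Set String) g =>
      if top_genres.contains g then PySem.Set.add acc g else PySem.Set.add acc "other")
      = (fun acc g => PySem.Set.add acc (if top_genres.contains g then g else "other")) := by
    funext acc g; split <;> rfl
  rw [h1, ← PySem.Set.update_map_eq_foldl_add]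
  exact PySem.Set.update_nil_left _

-- membership in A's set
theorem mem_aSet (genres_row top_genres : List String) (x : String) :
    x ∈ PySem.Set.ofList (genres_row.map (fun g => if top_genres.contains g then g else "other"))
    ↔ ((x ∈ genres_row ∧ x ∈ top_genres) ∨ ((∃ g ∈ genres_row, g ∉ top_genres) ∧ x = "other")) := by
  rw [PySem.Set.mem_ofList]
  simp only [List.mem_map]
  constructor
  · rintro ⟨g, hg, hx⟩
    by_cases hc : top_genres.contains g
    · rw [if_pos hc] at hx; subst hx; exact Or.inl ⟨hg, by simpa using hc⟩
    · rw [if_neg hc] at hx; exact Or.inr ⟨⟨g, hg, by simpa using hc⟩, hx.symm⟩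
  · rintro (⟨h1, h2⟩ | ⟨⟨g, hg, hgn⟩, h1⟩)
    · exact ⟨x, h1, by simp [h2]⟩
    · exact ⟨g, hg, by simp [hgn, h1]⟩

-- B's base list is strictly increasing
theorem base_pairwise (genres_row top_genres : List String) :
    ((PySem.List.sorted (PySem.Set.ofList top_genres) (fun x => x) false).filter
      (fun t => PySem.Set.contains (PySem.Set.ofList genres_row) t)).Pairwise (· < ·) :=
  (PySem.List.sorted_ofList_pairwise_lt top_genres).filter _

-- membership of B's base list
theorem mem_base (genres_row top_genres : List String) (x : String) :
    (x ∈ (PySem.List.sorted (PySem.Set.ofList top_genres) (fun x => x) false).filter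
      (fun t => PySem.Set.contains (PySem.Set.ofList genres_row) t))
    ↔ (x ∈ genres_row ∧ x ∈ top_genres) := by
  rw [List.mem_filter, PySem.List.mem_sorted, PySem.Set.mem_ofList]
  constructor
  · rintro ⟨h1, h2⟩
    refine ⟨?_, h1⟩
    have := PySem.Set.contains_iff (PySem.Set.ofList genres_row) x |>.mp h2
    rwa [PySem.Set.mem_ofList] at this
  · rintro ⟨h1, h2⟩
    exact ⟨h2, (PySem.Set.contains_iff _ _).mpr ((PySem.Set.mem_ofList _ _).mpr h1)⟩

-- elements the scan did not pass over are strictly above c (c absent, list strictly increasing)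
theorem lt_of_mem_dropWhile (l : List String) (c : String)
    (hp : l.Pairwise (· < ·)) (hc : c ∉ l) :
    ∀ x ∈ l.dropWhile (fun x => decide (x < c)), c < x := by
  induction l with
  | nil => simp
  | cons a t ih =>
    rw [List.pairwise_cons] at hp
    rw [List.mem_cons] at hc
    push Not at hc
    rw [List.dropWhile_cons]
    split
    · exact ih hp.2 hc.2
    · rename_i h
      have hca : c < a := by
        have : ¬ a < c := by simpa using h
        exact lt_of_le_of_ne (le_of_not_gt this) hc.1
      intro x hx
      rcases List.mem_cons.mp hx with rfl | hx'
      · exact hca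
      · exact lt_trans hca (hp.1 x hx')

-- inserting c at the scan position of a strictly increasing list without c: decomposition into take/drop form
theorem insert_scan_eq (l : List String) (c : String) :
    PySem.List.insert l (((l.takeWhile (fun x => decide (x < c))).length : Nat) : Int) c
    = l.takeWhile (fun x => decide (x < c)) ++ c :: l.dropWhile (fun x => decide (x < c)) := by
  set T := l.takeWhile (fun x => decide (x < c)) with hT
  set D := l.dropWhile (fun x => decide (x < c)) with hD
  have htd : T ++ D = l := List.takeWhile_append_dropWhile
  have hlen : T.length ≤ l.length := (List.takeWhile_sublist _).length_le
  rw [PySem.List.insert_natCast l _ c hlen, ← htd, List.take_left, List.drop_left]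

-- the spliced list is strictly increasing
theorem insert_scan_pairwise (l : List String) (c : String)
    (hp : l.Pairwise (· < ·)) (hc : c ∉ l) :
    (l.takeWhile (fun x => decide (x < c)) ++ c :: l.dropWhile (fun x => decide (x < c))).Pairwise (· < ·) := by
  have htd := (List.takeWhile_append_dropWhile (p := fun x => decide (x < c)) (l := l))
  have hsorted : (l.takeWhile (fun x => decide (x < c)) ++ l.dropWhile (fun x => decide (x < c))).Pairwise (· < ·) := by
    rwa [htd]
  rw [List.pairwise_append] at hsorted
  obtain ⟨hpt, hpd, hcross⟩ := hsorted
  have hdrop := lt_of_mem_dropWhile l c hp hc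
  rw [List.pairwise_append]
  refine ⟨hpt, ?_, ?_⟩
  · rw [List.pairwise_cons]
    exact ⟨hdrop, hpd⟩
  · intro a ha b hb
    have hac : a < c := by
      have := List.mem_takeWhile_imp ha
      simpa using this
    rcases List.mem_cons.mp hb with rfl | hb'
    · exact hac
    · exact lt_trans hac (hdrop b hb')

-- ===== VERDICT (by name: the statement is the Claim_ definition above) =====
theorem map_genres_to_top_or_other_spec : Claim_equal_map_genres_to_top_or_other := by
  intro genres_row top_genres _
  unfold Spec_map_genres_to_top_or_other map_genres_to_top_or_other map_genres_to_top_or_other_alt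
  simp only [aSet_eq_ofList_map]
  set aset := PySem.Set.ofList (genres_row.map (fun g => if top_genres.contains g then g else "other")) with haset
  set base := (PySem.List.sorted (PySem.Set.ofList top_genres) (fun x => x) false).filter
      (fun t => PySem.Set.contains (PySem.Set.ofList genres_row) t) with hbase
  have hbp : base.Pairwise (· < ·) := base_pairwise genres_row top_genres
  by_cases hcond : ((PySem.Set.ofList genres_row).any (fun g => !(PySem.Set.contains (PySem.Set.ofList top_genres) g))
      && !(base.contains "other")) = true
  · -- "other" is spliced in
    rw [if_pos hcond]
    rw [Bool.and_eq_true] at hcond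
    have hother : "other" ∉ base := by
      have := hcond.2
      simp only [Bool.not_eq_true'] at this
      simpa using this
    have hany : ∃ g ∈ genres_row, g ∉ top_genres := by
      rcases List.any_eq_true.mp hcond.1 with ⟨g, hg, hgt⟩
      rw [PySem.Set.mem_ofList] at hg
      refine ⟨g, hg, ?_⟩
      simpa using hgt
    rw [insert_scan_eq base "other"]
    apply PySem.List.sorted_eq_of_perm_of_pairwise_lt (key := fun x => x)
    · -- permutation: nodup + same membership
      have hn1 : (base.takeWhile (fun x => decide (x < "other")) ++ "other" :: base.dropWhile (fun x => decide (x < "other"))).Nodup :=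
        (insert_scan_pairwise base "other" hbp hother).imp ne_of_lt
      have hn2 : aset.Nodup := PySem.Set.nodup_ofList _
      rw [List.perm_ext_iff_of_nodup hn1 hn2]
      intro x
      have hmem : x ∈ base.takeWhile (fun x => decide (x < "other")) ++ "other" :: base.dropWhile (fun x => decide (x < "other"))
          ↔ x = "other" ∨ x ∈ base := by
        simp only [List.mem_append, List.mem_cons]
        constructor
        · rintro (h | h | h)
          · exact Or.inr ((List.takeWhile_append_dropWhile (p := fun x => decide (x < "other")) (l := base)) ▸ List.mem_append_left _ h)
          · exact Or.inl h
          · exact Or.inr ((List.takeWhile_append_dropWhile (p := fun x => decide (x < "other")) (l := base)) ▸ List.mem_append_right _ h)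
        · rintro (h | h)
          · exact Or.inr (Or.inl h)
          · rw [← List.takeWhile_append_dropWhile (p := fun x => decide (x < "other")) (l := base)] at h
            rcases List.mem_append.mp h with h' | h'
            · exact Or.inl h'
            · exact Or.inr (Or.inr h')
      rw [hmem, haset, mem_aSet, hbase, mem_base]
      constructor
      · rintro (rfl | h)
        · exact Or.inr ⟨hany, rfl⟩
        · exact Or.inl h
      · rintro (h | ⟨_, rfl⟩)
        · exact Or.inr h
        · exact Or.inl rfl
    · exact insert_scan_pairwise base "other" hbp hother
  · -- no splice: base already equals sorted(aset)
    rw [if_neg hcond]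
    apply PySem.List.sorted_eq_of_perm_of_pairwise_lt (key := fun x => x)
    · have hn1 : base.Nodup := hbp.imp ne_of_lt
      have hn2 : aset.Nodup := PySem.Set.nodup_ofList _
      rw [List.perm_ext_iff_of_nodup hn1 hn2]
      intro x
      rw [haset, mem_aSet, hbase, mem_base]
      rw [Bool.and_eq_true, not_and_or] at hcond
      constructor
      · exact fun h => Or.inl h
      · rintro (h | ⟨⟨g, hg, hgt⟩, rfl⟩)
        · exact h
        · -- the condition failed, yet some row genre is non-top: so "other" ∈ base
          rcases hcond with h1 | h2
          · exfalso
            apply h1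
            refine List.any_eq_true.mpr ⟨g, (PySem.Set.mem_ofList _ _).mpr hg, ?_⟩
            simpa using hgt
          · have hb : "other" ∈ base := by simpa using h2
            exact (mem_base genres_row top_genres "other").mp (hbase ▸ hb)
    · exact hbp
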